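-- pv_equiv track=rewrite | github.com/dsa110/dsa110-contimg | backend/src/dsa110_contimg/api/db_adapters/query_builder.py | convert_sqlite_to_postgresql
-- ===== SOURCE A (Python) =====
-- def convert_sqlite_to_postgresql(query: str) -> str:
--     """Convert SQLite-style query to PostgreSQL style.
--
--     Converts:
--     - ? placeholders to $1, $2, etc.
--     - AUTOINCREMENT to SERIAL (in CREATE TABLE)
--
--     Note: This is a simple conversion for basic queries.
--     Complex queries may need manual adjustment.
--
--     Args:
--         query: SQLite-style query
--
--     Returns:
--         PostgreSQL-style query
--     """
--     # Convert placeholders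
--     result = []
--     param_count = 0
--     i = 0
--     while i < len(query):
--         if query[i] == '?':
--             param_count += 1
--             result.append(f"${param_count}")
--         else:
--             result.append(query[i])
--         i += 1
--
--     converted = ''.join(result)
--
--     # Convert AUTOINCREMENT to SERIAL
--     # Note: This is a simple pattern match - may need refinement
--     converted = converted.replace(
--         "INTEGER PRIMARY KEY AUTOINCREMENT",
--         "SERIAL PRIMARY KEY"
--     )
--
--     return converted
-- ===== SOURCE B (Python) =====
-- def convert_sqlite_to_postgresql(query: str) -> str:
--     """Convert SQLite-style query to PostgreSQL style.
--
--     Token-based: split on '?' and interleave the segments with $1, $2, ...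
--     instead of walking the string character by character.
--     """
--     parts = query.split('?')
--     converted = parts[0]
--     for n, seg in enumerate(parts[1:], 1):
--         converted += f"${n}" + seg
--     return converted.replace(
--         "INTEGER PRIMARY KEY AUTOINCREMENT",
--         "SERIAL PRIMARY KEY"
--     )
-- ===== Notes on version B (the rewrite author's own statement) =====
-- stated objective: simpler
-- what changed: Replaces the character-by-character while-loop with its manual index and placeholder counter by splitting the query on the placeholder character and folding once over the segments, interleaving them with $1..$n.
import Mathlib
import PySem

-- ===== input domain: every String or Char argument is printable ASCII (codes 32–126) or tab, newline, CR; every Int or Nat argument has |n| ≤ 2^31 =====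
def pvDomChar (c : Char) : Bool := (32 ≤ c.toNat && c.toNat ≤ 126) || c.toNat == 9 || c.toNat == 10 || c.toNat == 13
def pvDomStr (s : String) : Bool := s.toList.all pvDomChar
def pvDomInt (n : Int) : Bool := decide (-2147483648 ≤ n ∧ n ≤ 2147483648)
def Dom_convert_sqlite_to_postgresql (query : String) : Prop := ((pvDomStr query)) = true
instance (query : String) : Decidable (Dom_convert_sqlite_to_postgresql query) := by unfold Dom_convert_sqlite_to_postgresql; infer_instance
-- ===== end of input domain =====

-- B replaces A's character-by-character loop (manual index + placeholder counter) by a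
-- split('?') into segments interleaved with $1..$n in one fold; objective: simpler.

-- ===== PORT A =====
-- the while-loop over query[i]: appends "$<count>" for '?', else the character; count carried along
def pvConvAGo : List Char → Int → List (List Char)
  | [], _ => []
  | c :: t, n =>
    if c = '?' then ('$' :: PySem.Int.toChars (n + 1)) :: pvConvAGo t (n + 1)
    else [c] :: pvConvAGo t n

def convert_sqlite_to_postgresql (query : String) : String :=
  let result := pvConvAGo query.toList 0          -- the while-loop building `result`, param_count starts at 0
  let converted := PySem.Chars.join [] result     -- ''.join(result)
  PySem.Str.replace (String.ofList converted)
    "INTEGER PRIMARY KEY AUTOINCREMENT" "SERIAL PRIMARY KEY"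

-- ===== PORT B =====
def convert_sqlite_to_postgresql_alt (query : String) : String :=
  let parts := PySem.Chars.splitOn query.toList ['?']   -- query.split('?'), separator literal and nonempty
  let converted := (PySem.List.enumerate (parts.drop 1) 1).foldl   -- for n, seg in enumerate(parts[1:], 1)
      (fun acc p => acc ++ ('$' :: PySem.Int.toChars p.1) ++ p.2)  -- converted += f"${n}" + seg
      (parts.headD [])                                             -- parts[0] (split never returns [])
  PySem.Str.replace (String.ofList converted)
    "INTEGER PRIMARY KEY AUTOINCREMENT" "SERIAL PRIMARY KEY"

-- ===== PRECONDITION & SPEC =====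
def Spec_convert_sqlite_to_postgresql (query : String) (out : String) : Prop := out = convert_sqlite_to_postgresql_alt query
instance (query : String) (out : String) : Decidable (Spec_convert_sqlite_to_postgresql query out) := by unfold Spec_convert_sqlite_to_postgresql; infer_instance

-- ===== CLAIM (what is proved, stated in full; the proofs are below) =====
def Claim_equal_convert_sqlite_to_postgresql : Prop := ∀ (query : String), Dom_convert_sqlite_to_postgresql query → Spec_convert_sqlite_to_postgresql query (convert_sqlite_to_postgresql query)

-- ===== LEMMAS AND PROOFS =====

/-- Simple structural description of `splitOn · ['?']`. -/
def pvSpl : List Char → List (List Char)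
  | [] => [[]]
  | c :: t => if c = '?' then [] :: pvSpl t else (pvSpl t).modifyHead (c :: ·)

theorem pvSpl_ne_nil (cs : List Char) : pvSpl cs ≠ [] := by
  induction cs with
  | nil => simp [pvSpl]
  | cons c t ih =>
    simp only [pvSpl]
    split_ifs
    · simp
    · cases h : pvSpl t with
      | nil => exact absurd h ih
      | cons p r => simp [List.modifyHead]

theorem pvSplitOn_go_eq (cs : List Char) :
    ∀ fuel, cs.length ≤ fuel → ∀ (cur : List Char) (accs : List (List Char)),
    PySem.Chars.splitOn.go ['?'] fuel cs cur accs =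
      accs.reverse ++ (pvSpl cs).modifyHead (cur.reverse ++ ·) := by
  induction cs with
  | nil =>
    intro fuel _ cur accs
    cases fuel <;> simp [PySem.Chars.splitOn.go, pvSpl]
  | cons c t ih =>
    intro fuel hf cur accs
    cases fuel with
    | zero => simp at hf
    | succ f =>
      have hf' : t.length ≤ f := by simpa using hf
      by_cases hc : c = '?'
      · subst hc
        rw [PySem.Chars.splitOn.go]
        simp only [List.isPrefixOf, if_true, List.drop_succ_cons,
          List.drop_zero, List.length_singleton, beq_self_eq_true, Bool.and_self]
        rw [ih f hf' [] (cur.reverse :: accs)]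
        cases h : pvSpl t with
        | nil => exact absurd h (pvSpl_ne_nil t)
        | cons p r => simp [pvSpl, List.modifyHead, h]
      · rw [PySem.Chars.splitOn.go]
        have hpre : List.isPrefixOf ['?'] (c :: t) = false := by
          simp [List.isPrefixOf_cons₂]
          intro h; exact absurd h.symm hc
        rw [hpre]
        simp only [Bool.false_eq_true, if_false]
        rw [ih f hf' (c :: cur) accs]
        cases h : pvSpl t with
        | nil => exact absurd h (pvSpl_ne_nil t)
        | cons p r => simp [pvSpl, hc, h, List.modifyHead]

theorem pvSplitOn_eq (cs : List Char) : PySem.Chars.splitOn cs ['?'] = pvSpl cs := by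
  rw [PySem.Chars.splitOn, pvSplitOn_go_eq cs (cs.length + 1) (Nat.le_succ _) [] []]
  cases h : pvSpl cs with
  | nil => exact absurd h (pvSpl_ne_nil cs)
  | cons p r => simp [List.modifyHead]

theorem pvJoin_nil_cons (x : List Char) (xs : List (List Char)) :
    PySem.Chars.join [] (x :: xs) = x ++ PySem.Chars.join [] xs := by
  cases xs <;> simp [PySem.Chars.join, List.intercalate]

/-- Tail assembly: interleave `$k`, `$k+1`, … before the remaining segments. -/
def pvAsmTail : Int → List (List Char) → List Char
  | _, [] => []
  | k, p :: rest => ('$' :: PySem.Int.toChars k) ++ p ++ pvAsmTail (k + 1) rest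

theorem pvFoldl_enumerate_eq (rest : List (List Char)) :
    ∀ (k : Int) (acc : List Char),
    (PySem.List.enumerate rest k).foldl
      (fun acc p => acc ++ ('$' :: PySem.Int.toChars p.1) ++ p.2) acc
      = acc ++ pvAsmTail k rest := by
  induction rest with
  | nil => intro k acc; simp [PySem.List.enumerate_nil, pvAsmTail]
  | cons p r ih =>
    intro k acc
    rw [PySem.List.enumerate_cons, List.foldl_cons, ih]
    simp [pvAsmTail]

theorem pvJoin_convAGo (cs : List Char) :
    ∀ n, PySem.Chars.join [] (pvConvAGo cs n)
      = (pvSpl cs).headD [] ++ pvAsmTail (n + 1) (pvSpl cs).tail := by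
  induction cs with
  | nil => intro n; simp [pvConvAGo, pvSpl, pvAsmTail, PySem.Chars.join, List.intercalate]
  | cons c t ih =>
    intro n
    by_cases hc : c = '?'
    · subst hc
      cases h : pvSpl t with
      | nil => exact absurd h (pvSpl_ne_nil t)
      | cons p r =>
        simp only [pvConvAGo, pvSpl, if_true]
        rw [pvJoin_nil_cons, ih (n + 1)]
        simp [h, pvAsmTail, add_assoc]
    · cases h : pvSpl t with
      | nil => exact absurd h (pvSpl_ne_nil t)
      | cons p r =>
        simp only [pvConvAGo, if_neg hc, pvSpl]
        rw [pvJoin_nil_cons, ih n]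
        simp [h, List.modifyHead]

-- ===== VERDICT (by name: the statement is the Claim_ definition above) =====
theorem convert_sqlite_to_postgresql_spec : Claim_equal_convert_sqlite_to_postgresql := by
  intro query _
  unfold Spec_convert_sqlite_to_postgresql convert_sqlite_to_postgresql convert_sqlite_to_postgresql_alt
  simp only [pvSplitOn_eq, pvJoin_convAGo, pvFoldl_enumerate_eq]
  congr 2
  cases h : pvSpl query.toList with
  | nil => exact absurd h (pvSpl_ne_nil _)
  | cons p rest => simp
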